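-- pv_equiv track=rewrite | github.com/rain2473/coding-test | 프로그래머스/lv2/17686. ［3차］ 파일명 정렬/［3차］ 파일명 정렬.py | spliter
-- ===== SOURCE A (Python) =====
-- def spliter(file):
--     idx = []
--     for i,c in enumerate(file):
--         try:
--             int(c)
--             idx.append(i)
--         except:
--             if len(idx) != 0:
--                 break
--             else:
--                 continue
--     head = file[:idx[0]]
--     number = file[idx[0]:idx[-1]+1]
--     tail = file[idx[-1]+1:]
--     return [head, number, tail]
-- ===== SOURCE B (Python) =====
-- import re
--
-- def spliter(file):
--     # split at the first maximal digit run; the capturing group keeps the run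
--     return re.split(r'(\d+)', file, maxsplit=1)
-- ===== Notes on version B (the rewrite author's own statement) =====
-- stated objective: idiomatic
-- what changed: Replaces the manual index-collecting loop with break logic and three slice expressions by a single re.split on the first digit run (capturing group keeps the number).
-- crash fix: On filenames containing no digit A raises IndexError (idx[0] on an empty list) while B returns the one-element list [file]. — e.g. on spliter("img.png"): A raises IndexError, B returns ["img.png"]
import Mathlib
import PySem

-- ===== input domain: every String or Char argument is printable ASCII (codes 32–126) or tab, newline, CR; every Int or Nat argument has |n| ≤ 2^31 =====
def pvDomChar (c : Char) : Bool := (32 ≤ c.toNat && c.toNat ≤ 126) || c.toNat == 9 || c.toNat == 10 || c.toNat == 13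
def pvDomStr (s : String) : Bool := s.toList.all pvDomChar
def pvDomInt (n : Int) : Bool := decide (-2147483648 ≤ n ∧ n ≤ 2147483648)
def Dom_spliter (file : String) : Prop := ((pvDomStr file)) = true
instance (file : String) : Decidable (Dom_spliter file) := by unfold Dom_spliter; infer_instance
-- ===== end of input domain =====

-- B replaces A's index-collecting loop and triple slicing by a single split at the
-- first maximal digit run (Python: re.split with a capturing group), same values on Pre_.


-- ===== PORT A =====
-- the for-loop over enumerate(file): collect indices of the first digit run, break after it.
-- `int(c)` on a single printable-ASCII char succeeds exactly for '0'..'9' (= Char.isDigit): exact on Dom.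
def spliterLoop : List (Int × Char) → List Int → List Int
  | [], idx => idx
  | (i, c) :: rest, idx =>
    if c.isDigit then spliterLoop rest (idx ++ [i])
    else if idx.length ≠ 0 then idx
    else spliterLoop rest idx

def spliter (file : String) : List String :=
  let idx := spliterLoop (PySem.List.enumerate file.toList 0) []
  match PySem.List.pyGet? idx 0, PySem.List.pyGet? idx (-1) with
  | some i0, some il =>
    [String.ofList (PySem.List.slice file.toList none (some i0)),
     String.ofList (PySem.List.slice file.toList (some i0) (some (il + 1))),
     String.ofList (PySem.List.slice file.toList (some (il + 1)) none)]
  | _, _ => []  -- IndexError in Python: outside Pre_spliter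

-- ===== PORT B =====
-- hand port of re.split(r'(\d+)', file, maxsplit=1): scan to the first digit (\d on ASCII = '0'..'9',
-- exact on Dom), return [prefix, maximal digit run, remainder]; no digit → the whole string, one piece.
def spliterAltGo : List Char → List Char → List String
  | [], acc => [String.ofList acc]
  | c :: rest, acc =>
    if c.isDigit then
      [String.ofList acc,
       String.ofList (c :: rest.takeWhile Char.isDigit),
       String.ofList (rest.dropWhile Char.isDigit)]
    else spliterAltGo rest (acc ++ [c])

def spliter_alt (file : String) : List String := spliterAltGo file.toList []

-- ===== PRECONDITION & SPEC =====
-- Pre_ excludes exactly the filenames with no digit: there A raises IndexError (idx[0] on []).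
def Pre_spliter (file : String) : Prop := file.toList.any Char.isDigit = true
instance (file : String) : Decidable (Pre_spliter file) := by unfold Pre_spliter; infer_instance
def pvWitness_spliter : String := "img12.png"

-- On filenames containing no digit A raises IndexError while B returns the one-element list [file].
def Raises_spliter (file : String) : Prop := file.toList.any Char.isDigit = false
instance (file : String) : Decidable (Raises_spliter file) := by unfold Raises_spliter; infer_instance
def pvRaiseWitness_spliter : String := "img.png"
def pvRaiseWitnessOut_spliter : List String := ["img.png"]

def Spec_spliter (file : String) (out : List String) : Prop := out = spliter_alt file
instance (file : String) (out : List String) : Decidable (Spec_spliter file out) := by unfold Spec_spliter; infer_instance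

-- ===== CLAIM (what is proved, stated in full; the proofs are below) =====
def Claim_equal_spliter : Prop := ∀ (file : String), Dom_spliter file → Pre_spliter file → Spec_spliter file (spliter file)
def Claim_raises_spliter : Prop := (∀ (file : String), Dom_spliter file → Raises_spliter file → ¬ Pre_spliter file) ∧ (Dom_spliter (pvRaiseWitness_spliter) ∧ Raises_spliter (pvRaiseWitness_spliter) ∧ spliter_alt (pvRaiseWitness_spliter) = pvRaiseWitnessOut_spliter)

-- ===== LEMMAS AND PROOFS =====

-- A's loop skips a digit-free prefix while idx is empty
theorem spliterLoop_skip (P : List Char) (hP : ∀ c ∈ P, c.isDigit = false) :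
    ∀ (rest : List Char) (s : Int),
      spliterLoop (PySem.List.enumerate (P ++ rest) s) [] =
      spliterLoop (PySem.List.enumerate rest (s + P.length)) [] := by
  induction P with
  | nil => intro rest s; simp
  | cons c P ih =>
    intro rest s
    have hc := hP c (by simp)
    rw [List.cons_append, PySem.List.enumerate_cons]
    simp only [spliterLoop, hc, Bool.false_eq_true, if_false, List.length_nil, ne_eq,
      not_true_eq_false]
    have hs : s + 1 + (P.length : Int) = s + ((c :: P).length : Int) := by
      simp only [List.length_cons]; push_cast; ring
    rw [ih (fun x hx => hP x (by simp [hx])) rest (s + 1), hs]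

-- A's loop collects the digit run D and breaks at the first non-digit after it
theorem spliterLoop_collect (D : List Char) (hD : ∀ c ∈ D, c.isDigit = true) :
    ∀ (T : List Char), (∀ t T', T = t :: T' → t.isDigit = false) →
    ∀ (s : Int) (idx : List Int), idx ≠ [] ∨ D ≠ [] →
      spliterLoop (PySem.List.enumerate (D ++ T) s) idx =
      idx ++ (List.range D.length).map (fun k : Nat => s + (k : Int)) := by
  induction D with
  | nil =>
    intro T hT s idx hne
    have hidx : idx ≠ [] := hne.resolve_right (fun h => h rfl)
    cases T with
    | nil => simp [spliterLoop]
    | cons t T' =>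
      have ht := hT t T' rfl
      simp [PySem.List.enumerate_cons, spliterLoop, ht, List.length_eq_zero_iff, hidx]
  | cons d D ih =>
    intro T hT s idx _
    have hd := hD d (by simp)
    rw [List.cons_append, PySem.List.enumerate_cons]
    simp only [spliterLoop, hd, if_true]
    rw [ih (fun c hc => hD c (by simp [hc])) T hT (s + 1) (idx ++ [s]) (Or.inl (by simp))]
    rw [List.length_cons, List.range_succ_eq_map, List.map_cons, List.map_map,
      List.append_assoc, List.singleton_append]
    simp only [Nat.cast_zero, add_zero]
    congr 2
    apply List.map_congr_left
    intro k _
    simp only [Function.comp_apply, Nat.succ_eq_add_one]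
    push_cast
    ring

-- B's scanner runs through a digit-free prefix accumulating it
theorem spliterAltGo_skip (P : List Char) (hP : ∀ c ∈ P, c.isDigit = false) :
    ∀ (rest acc : List Char),
      spliterAltGo (P ++ rest) acc = spliterAltGo rest (acc ++ P) := by
  induction P with
  | nil => intro rest acc; simp
  | cons c P ih =>
    intro rest acc
    have hc := hP c (by simp)
    simp only [List.cons_append, spliterAltGo, hc, Bool.false_eq_true, if_neg, not_false_iff]
    rw [ih (fun x hx => hP x (by simp [hx])) rest (acc ++ [c])]
    simp

theorem spliter_main (file : String) (h : Pre_spliter file) :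
    spliter file = spliter_alt file := by
  classical
  set L := file.toList with hL
  set P := L.takeWhile (fun c => !c.isDigit) with hPdef
  set R := L.dropWhile (fun c => !c.isDigit) with hRdef
  have hsplit : P ++ R = L := List.takeWhile_append_dropWhile
  have hPnd : ∀ c ∈ P, c.isDigit = false := by
    intro c hc
    have := List.mem_takeWhile_imp hc
    simpa using this
  have hRne : R ≠ [] := by
    intro hnil
    have hall : ∀ x ∈ L, (!x.isDigit) = true := List.dropWhile_eq_nil_iff.mp hnil
    unfold Pre_spliter at h
    rw [List.any_eq_true] at h
    obtain ⟨x, hx, hxd⟩ := h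
    have := hall x hx
    simp [hxd] at this
  obtain ⟨d, R₁, hR⟩ := List.exists_cons_of_ne_nil hRne
  have hRR : List.dropWhile (fun c => !c.isDigit) L = d :: R₁ := by rw [← hRdef]; exact hR
  have hd : d.isDigit = true := by
    have h1 : List.dropWhile (fun c : Char => !c.isDigit) L ≠ [] := by rw [hRR]; simp
    have h2 := List.head_dropWhile_not (fun c : Char => !c.isDigit) h1
    have h3 : (List.dropWhile (fun c : Char => !c.isDigit) L).head h1 = d := by simp [hRR]
    rw [h3] at h2
    simpa using h2
  set D := d :: R₁.takeWhile Char.isDigit with hDdef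
  set T := R₁.dropWhile Char.isDigit with hTdef
  have hDT : D ++ T = d :: R₁ := by
    simp only [hDdef, hTdef, List.cons_append]
    rw [List.takeWhile_append_dropWhile]
  have hDd : ∀ c ∈ D, c.isDigit = true := by
    intro c hc
    rcases List.mem_cons.mp hc with rfl | hc
    · exact hd
    · exact List.mem_takeWhile_imp hc
  have hTnd : ∀ t T', T = t :: T' → t.isDigit = false := by
    intro t T' hT
    have hTT : List.dropWhile Char.isDigit R₁ = t :: T' := by rw [← hTdef]; exact hT
    have h1 : List.dropWhile Char.isDigit R₁ ≠ [] := by rw [hTT]; simp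
    have h2 := List.head_dropWhile_not Char.isDigit h1
    have h3 : (List.dropWhile Char.isDigit R₁).head h1 = t := by simp [hTT]
    rw [h3] at h2
    simpa using h2
  have hLeq : L = P ++ (D ++ T) := by rw [hDT, ← hR, hsplit]
  -- A side
  have hidx : spliterLoop (PySem.List.enumerate L 0) [] =
      (List.range D.length).map (fun k : Nat => (P.length : Int) + (k : Int)) := by
    rw [hLeq, spliterLoop_skip P hPnd (D ++ T) 0,
        spliterLoop_collect D hDd T hTnd ((0 : Int) + P.length) [] (Or.inr (by simp [hDdef]))]
    simp
  have hr1 : D.length = (R₁.takeWhile Char.isDigit).length + 1 := by simp [hDdef]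
  set r := D.length with hrdef
  have hrpos : 1 ≤ r := by omega
  have hlenidx : ((List.range r).map (fun k : Nat => (P.length : Int) + (k : Int))).length = r := by simp
  have hget0 : PySem.List.pyGet? ((List.range r).map (fun k : Nat => (P.length : Int) + (k : Int))) 0 =
      some (P.length : Int) := by
    have : (0 : Int) = ((0 : Nat) : Int) := by norm_num
    rw [this, PySem.List.pyGet?_natCast]
    have h0r : 0 < r := hrpos
    simp [h0r]
  have hgetl : PySem.List.pyGet? ((List.range r).map (fun k : Nat => (P.length : Int) + (k : Int))) (-1) =
      some ((P.length : Int) + ((r - 1 : Nat) : Int)) := by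
    rw [show (-1 : Int) = -((1 : Nat) : Int) by norm_num]
    rw [PySem.List.pyGet?_neg_natCast _ _ (by norm_num) (by rw [hlenidx]; omega)]
    rw [List.getElem?_map]
    have hlt : r - 1 < r := by omega
    simp [hlenidx, hlt]
  unfold spliter
  rw [← hL]
  simp only [hidx, hget0, hgetl]
  -- the three slices
  have hPlen : P.length ≤ L.length := by rw [hLeq]; simp
  have e1 : PySem.List.slice L none (some ((P.length : Nat) : Int)) = P := by
    rw [PySem.List.slice_to_natCast, hLeq, List.take_left]
  have hcast : (P.length : Int) + ((r - 1 : Nat) : Int) + 1 = ((P.length + r : Nat) : Int) := by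
    push_cast [Nat.cast_sub hrpos]
    ring
  have e2 : PySem.List.slice L (some ((P.length : Nat) : Int))
      (some ((P.length : Int) + ((r - 1 : Nat) : Int) + 1)) = D := by
    rw [hcast, show ((P.length + r : Nat) : Int) = ((P.length : Nat) : Int) + ((r : Nat) : Int) by push_cast; ring,
        PySem.List.slice_natCast_add, hLeq, List.drop_left, hrdef, List.take_left]
  have e3 : PySem.List.slice L (some ((P.length : Int) + ((r - 1 : Nat) : Int) + 1)) none = T := by
    rw [hcast, PySem.List.slice_from_natCast, hLeq, ← List.append_assoc]
    have : (P ++ D).length = P.length + r := by simp [hrdef]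
    rw [← this, List.drop_left]
  rw [e1, e2, e3]
  -- B side
  unfold spliter_alt
  rw [← hL, hLeq, spliterAltGo_skip P hPnd (D ++ T) []]
  simp only [hDdef, hTdef, List.cons_append, spliterAltGo, hd, if_pos, List.nil_append]
  rw [List.takeWhile_append_dropWhile]

-- ===== VERDICT (by name: the statement is the Claim_ definition above) =====
theorem spliter_spec : Claim_equal_spliter := by
  intro file _ hpre
  unfold Spec_spliter
  exact spliter_main file hpre

@[simp]
theorem spliter_raises : Claim_raises_spliter := by
  unfold Claim_raises_spliter
  constructor
  · intro file _ hra hpre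
    unfold Raises_spliter at hra
    unfold Pre_spliter at hpre
    simp [hra] at hpre
  · exact ⟨by decide, by decide, by decide⟩
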